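-- pv_equiv track=rewrite | github.com/er1123090/personal-api-2 | evaluation_singleturn-f1-aggregate.py | counts_slot_and_value_or
-- ===== SOURCE A (Python) =====
-- from typing import Any, Dict, List, Set, Tuple, Union, Optional
--
-- def counts_slot_and_value_or(
--     gt_allowed: Dict[Tuple[str, str], Set[str]],
--     pred_vals: Dict[Tuple[str, str], Set[str]],
-- ) -> Tuple[int, int, int]:
--     tp = fp = fn = 0
--
--     for key, allowed_vals in gt_allowed.items():
--         pv = pred_vals.get(key, set())
--         if pv and (pv & allowed_vals):
--             tp += 1
--         else:
--             fn += 1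
--
--     for key, pv in pred_vals.items():
--         if key not in gt_allowed:
--             fp += 1
--         else:
--             allowed_vals = gt_allowed[key]
--             if not (pv & allowed_vals):
--                 fp += 1
--
--     return tp, fp, fn
-- ===== SOURCE B (Python) =====
-- def counts_slot_and_value_or(gt_allowed, pred_vals):
--     tp = sum(1 for key, av in gt_allowed.items() if pred_vals.get(key, set()) & av)
--     return tp, len(pred_vals) - tp, len(gt_allowed) - tp
-- ===== Notes on version B (the rewrite author's own statement) =====
-- stated objective: simpler
-- what changed: B drops A's entire second loop and both else-branch counters: it counts tp (gt keys whose predicted value set intersects the allowed set) in a single comprehension and derives fn = len(gt_allowed) - tp and fp = len(pred_vals) - tp arithmetically, which equals A's independently accumulated counts because dict keys are unique.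
import Mathlib
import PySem

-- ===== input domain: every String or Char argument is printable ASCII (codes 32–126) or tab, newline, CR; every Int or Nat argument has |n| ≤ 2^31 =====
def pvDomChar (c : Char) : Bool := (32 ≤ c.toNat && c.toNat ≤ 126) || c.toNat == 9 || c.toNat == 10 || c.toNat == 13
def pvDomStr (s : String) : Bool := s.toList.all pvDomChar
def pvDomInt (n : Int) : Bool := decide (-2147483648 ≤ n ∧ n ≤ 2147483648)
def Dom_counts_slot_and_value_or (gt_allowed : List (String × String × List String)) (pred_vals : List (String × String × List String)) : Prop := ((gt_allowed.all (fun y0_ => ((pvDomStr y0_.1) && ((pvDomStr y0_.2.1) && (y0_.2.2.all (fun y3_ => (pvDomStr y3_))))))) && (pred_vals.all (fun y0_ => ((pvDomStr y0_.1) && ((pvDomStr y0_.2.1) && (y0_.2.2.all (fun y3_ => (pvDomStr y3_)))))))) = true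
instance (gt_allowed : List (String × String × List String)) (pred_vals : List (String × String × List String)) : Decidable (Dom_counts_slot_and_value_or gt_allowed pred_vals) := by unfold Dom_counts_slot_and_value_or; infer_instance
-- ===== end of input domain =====

-- B replaces A's second loop and both else-branches by arithmetic: it counts tp in one pass
-- and derives fp = |pred| - tp and fn = |gt| - tp (simpler; same asymptotic cost).

-- ===== PORT A =====
-- dict lookup by the (str, str) key pair, first match (hand-ported: the entry type is
-- String × String × List String, so PySem.Dict's single-component key does not apply; exact
-- for assoc lists with distinct keys, which is what a Python dict yields)
def svLookup? (m : List (String × String × List String)) (k : String × String) : Option (List String) :=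
  match m with
  | [] => none
  | (a, b, v) :: rest => if a = k.1 ∧ b = k.2 then some v else svLookup? rest k

-- truthiness of `pv & av` on sets represented as distinct-element lists: some element in both
def svInter (pv av : List String) : Bool := pv.any (fun x => av.contains x)

-- first loop of A: the (tp, fn) pair
def stepGt (pred_vals : List (String × String × List String)) (s : Int × Int) (e : String × String × List String) : Int × Int :=
  let pv := (svLookup? pred_vals (e.1, e.2.1)).getD []
  if !pv.isEmpty && svInter pv e.2.2 then (s.1 + 1, s.2) else (s.1, s.2 + 1)

-- second loop of A: fp
def stepPred (gt_allowed : List (String × String × List String)) (fp : Int) (e : String × String × List String) : Int :=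
  match svLookup? gt_allowed (e.1, e.2.1) with
  | none => fp + 1
  | some av => if svInter e.2.2 av then fp else fp + 1

def counts_slot_and_value_or (gt_allowed : List (String × String × List String)) (pred_vals : List (String × String × List String)) : Int × Int × Int :=
  let s := gt_allowed.foldl (stepGt pred_vals) (0, 0)
  let fp := pred_vals.foldl (stepPred gt_allowed) 0
  (s.1, fp, s.2)

-- ===== PORT B =====
-- B's comprehension condition: pred_vals.get(key, set()) & av is nonempty
def altCond (pred_vals : List (String × String × List String)) (e : String × String × List String) : Bool :=
  svInter ((svLookup? pred_vals (e.1, e.2.1)).getD []) e.2.2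

def counts_slot_and_value_or_alt (gt_allowed : List (String × String × List String)) (pred_vals : List (String × String × List String)) : Int × Int × Int :=
  let tp : Int := (gt_allowed.countP (altCond pred_vals) : Int)
  (tp, (pred_vals.length : Int) - tp, (gt_allowed.length : Int) - tp)

-- ===== PRECONDITION & SPEC =====
-- Pre_ excludes association lists with a repeated (str, str) key, which cannot arise from a
-- Python dict argument (each parameter of A is a dict, so its key list is duplicate-free).
def Pre_counts_slot_and_value_or (gt_allowed : List (String × String × List String)) (pred_vals : List (String × String × List String)) : Prop :=
  (gt_allowed.map (fun e => (e.1, e.2.1))).Nodup ∧ (pred_vals.map (fun e => (e.1, e.2.1))).Nodup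
instance (gt_allowed : List (String × String × List String)) (pred_vals : List (String × String × List String)) : Decidable (Pre_counts_slot_and_value_or gt_allowed pred_vals) := by unfold Pre_counts_slot_and_value_or; infer_instance

def pvWitness_counts_slot_and_value_or : (List (String × String × List String)) × (List (String × String × List String)) :=
  ([("hotel", "area", ["north", "centre"]), ("hotel", "stars", ["4"])],
   [("hotel", "area", ["centre"]), ("taxi", "dest", ["cambridge"])])

def Spec_counts_slot_and_value_or (gt_allowed : List (String × String × List String)) (pred_vals : List (String × String × List String)) (out : Int × Int × Int) : Prop := out = counts_slot_and_value_or_alt gt_allowed pred_vals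
instance (gt_allowed : List (String × String × List String)) (pred_vals : List (String × String × List String)) (out : Int × Int × Int) : Decidable (Spec_counts_slot_and_value_or gt_allowed pred_vals out) := by unfold Spec_counts_slot_and_value_or; infer_instance

-- ===== CLAIM (what is proved, stated in full; the proofs are below) =====
def Claim_equal_counts_slot_and_value_or : Prop := ∀ (gt_allowed : List (String × String × List String)) (pred_vals : List (String × String × List String)), Dom_counts_slot_and_value_or gt_allowed pred_vals → Pre_counts_slot_and_value_or gt_allowed pred_vals → Spec_counts_slot_and_value_or gt_allowed pred_vals (counts_slot_and_value_or gt_allowed pred_vals)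

-- ===== LEMMAS AND PROOFS =====

-- the key of an entry
def svKey (e : String × String × List String) : String × String := (e.1, e.2.1)

-- lookup with default, as a function of the key
def svGetD (m : List (String × String × List String)) (k : String × String) : List String :=
  (svLookup? m k).getD []

-- a key absent from the key list looks up to none
theorem svLookup?_eq_none_of_not_mem (m : List (String × String × List String)) (k : String × String)
    (h : k ∉ m.map svKey) : svLookup? m k = none := by
  induction m with
  | nil => rfl
  | cons e rest ih =>
    simp only [List.map_cons, List.mem_cons, not_or] at h
    have hne : ¬ (e.1 = k.1 ∧ e.2.1 = k.2) := by
      intro ⟨h1, h2⟩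
      exact h.1 (by simp [svKey, h1, h2])
    simp [svLookup?, hne, ih h.2]

theorem mem_of_svGetD_ne_nil (m : List (String × String × List String)) (k : String × String)
    (h : svGetD m k ≠ []) : k ∈ m.map svKey := by
  by_contra hm
  exact h (by simp [svGetD, svLookup?_eq_none_of_not_mem m k hm])

-- `pv and (pv & av)` truthiness: the emptiness test is subsumed by the intersection test
theorem isEmpty_and_svInter (pv av : List String) : (!pv.isEmpty && svInter pv av) = svInter pv av := by
  cases pv <;> simp [svInter]

-- stepGt's branch condition is exactly altCond
theorem stepGt_eq (pred_vals : List (String × String × List String)) (s : Int × Int) (e : String × String × List String) :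
    stepGt pred_vals s e = if altCond pred_vals e then (s.1 + 1, s.2) else (s.1, s.2 + 1) := by
  simp [stepGt, altCond, isEmpty_and_svInter]

-- A's first loop computes (tp0 + #{altCond}, fn0 + #{not altCond})
theorem foldGt_eq (pred_vals : List (String × String × List String)) :
    ∀ (l : List (String × String × List String)) (a b : Int),
      l.foldl (stepGt pred_vals) (a, b) =
        (a + (l.countP (altCond pred_vals) : Int), b + (l.countP (fun e => !altCond pred_vals e) : Int)) := by
  intro l
  induction l with
  | nil => simp
  | cons e rest ih =>
    intro a b
    rw [List.foldl_cons, stepGt_eq]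
    by_cases h : altCond pred_vals e = true <;> simp [h, ih] <;> ring

-- A's second loop counts the pred entries with missing key or empty intersection
theorem foldPred_eq (gt_allowed : List (String × String × List String)) :
    ∀ (l : List (String × String × List String)) (a : Int),
      l.foldl (stepPred gt_allowed) a =
        a + (l.countP (fun e => !(match svLookup? gt_allowed (e.1, e.2.1) with
                                  | none => false
                                  | some av => svInter e.2.2 av)) : Int) := by
  intro l
  induction l with
  | nil => simp
  | cons e rest ih =>
    intro a
    rcases hl : svLookup? gt_allowed (e.1, e.2.1) with _ | av
    · simp [List.foldl_cons, stepPred, hl, ih]; ring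
    · by_cases h : svInter e.2.2 av = true <;> simp [List.foldl_cons, stepPred, hl, ih, h]
      ring

-- counting entries by a key/value predicate = counting keys, looking the value up (needs Nodup keys)
theorem countP_entries_eq_countP_keys (p : String × String → List String → Bool) :
    ∀ (m : List (String × String × List String)), (m.map svKey).Nodup →
      m.countP (fun e => p (e.1, e.2.1) e.2.2) = (m.map svKey).countP (fun k => p k (svGetD m k)) := by
  intro m
  induction m with
  | nil => intro _; rfl
  | cons e rest ih =>
    intro hnd
    simp only [List.map_cons, List.nodup_cons] at hnd
    have hhead : svGetD (e :: rest) (e.1, e.2.1) = e.2.2 := by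
      simp [svGetD, svLookup?]
    have htail : ∀ k ∈ rest.map svKey, svGetD (e :: rest) k = svGetD rest k := by
      intro k hk
      have hne : ¬ (e.1 = k.1 ∧ e.2.1 = k.2) := by
        intro ⟨h1, h2⟩
        have hk' : svKey e = k := by simp [svKey, h1, h2]
        exact hnd.1 (hk' ▸ hk)
      simp [svGetD, svLookup?, hne]
    calc (e :: rest).countP (fun e => p (e.1, e.2.1) e.2.2)
        = (rest.countP (fun e => p (e.1, e.2.1) e.2.2)) + (if p (e.1, e.2.1) e.2.2 then 1 else 0) := by
          simp [List.countP_cons]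
      _ = ((rest.map svKey).countP (fun k => p k (svGetD rest k))) + (if p (e.1, e.2.1) e.2.2 then 1 else 0) := by
          rw [ih hnd.2]
      _ = ((rest.map svKey).countP (fun k => p k (svGetD (e :: rest) k))) + (if p (e.1, e.2.1) e.2.2 then 1 else 0) := by
          have hc : (rest.map svKey).countP (fun k => p k (svGetD rest k)) =
              (rest.map svKey).countP (fun k => p k (svGetD (e :: rest) k)) :=
            List.countP_congr (fun k hk => by rw [htail k hk])
          rw [hc]
      _ = ((e :: rest).map svKey).countP (fun k => p k (svGetD (e :: rest) k)) := by
          simp [List.countP_cons, svKey, hhead]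

-- the shared key predicate: the two looked-up value sets intersect
def svBoth (gt_allowed pred_vals : List (String × String × List String)) (k : String × String) : Bool :=
  svInter (svGetD pred_vals k) (svGetD gt_allowed k)

theorem svBoth_mem {gt_allowed pred_vals : List (String × String × List String)} {k : String × String}
    (h : svBoth gt_allowed pred_vals k = true) :
    k ∈ gt_allowed.map svKey ∧ k ∈ pred_vals.map svKey := by
  simp only [svBoth, svInter, List.any_eq_true] at h
  obtain ⟨x, hxp, hxg⟩ := h
  constructor
  · apply mem_of_svGetD_ne_nil
    intro h0; rw [h0] at hxg; simp at hxg
  · apply mem_of_svGetD_ne_nil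
    intro h0; rw [h0] at hxp; simp at hxp

-- with duplicate-free keys on both sides, the matching keys are counted equally from either side
theorem countP_svBoth_eq (gt_allowed pred_vals : List (String × String × List String))
    (hg : (gt_allowed.map svKey).Nodup) (hp : (pred_vals.map svKey).Nodup) :
    (gt_allowed.map svKey).countP (svBoth gt_allowed pred_vals) =
      (pred_vals.map svKey).countP (svBoth gt_allowed pred_vals) := by
  rw [List.countP_eq_length_filter, List.countP_eq_length_filter]
  apply List.Perm.length_eq
  apply (List.perm_ext_iff_of_nodup (hg.filter _) (hp.filter _)).mpr
  intro k
  simp only [List.mem_filter]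
  constructor
  · rintro ⟨_, hb⟩; exact ⟨(svBoth_mem hb).2, hb⟩
  · rintro ⟨_, hb⟩; exact ⟨(svBoth_mem hb).1, hb⟩

-- countP p + countP !p = length
theorem countP_add_countP_not {α : Type} (l : List α) (p : α → Bool) :
    l.countP p + l.countP (fun a => !p a) = l.length := by
  induction l with
  | nil => simp
  | cons x xs ih => by_cases h : p x = true <;> simp [h] <;> omega

-- A's tp (per gt entry) seen as a count over gt keys
theorem tp_as_keys (gt_allowed pred_vals : List (String × String × List String))
    (hg : (gt_allowed.map svKey).Nodup) :
    gt_allowed.countP (altCond pred_vals) =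
      (gt_allowed.map svKey).countP (svBoth gt_allowed pred_vals) := by
  have hA : gt_allowed.countP (altCond pred_vals) =
      gt_allowed.countP (fun e => svInter ((svLookup? pred_vals (e.1, e.2.1)).getD []) e.2.2) := rfl
  have h := countP_entries_eq_countP_keys (fun k v => svInter (svGetD pred_vals k) v) gt_allowed hg
  simp only [svGetD] at h
  rw [hA, h]
  exact rfl

-- A's fp-complement (per pred entry) seen as the same count over pred keys
theorem fp_compl_as_keys (gt_allowed pred_vals : List (String × String × List String))
    (hp : (pred_vals.map svKey).Nodup) :
    pred_vals.countP (fun e => (match svLookup? gt_allowed (e.1, e.2.1) with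
                                | none => false
                                | some av => svInter e.2.2 av)) =
      (pred_vals.map svKey).countP (svBoth gt_allowed pred_vals) := by
  have h := countP_entries_eq_countP_keys
      (fun k v => (match svLookup? gt_allowed k with | none => false | some av => svInter v av))
      pred_vals hp
  rw [h]
  apply List.countP_congr
  intro k hk
  rcases hl : svLookup? gt_allowed k with _ | av
  · simp [hl, svBoth, svGetD, svInter]
  · simp [hl, svBoth, svGetD]

-- ===== VERDICT (by name: the statement is the Claim_ definition above) =====
theorem counts_slot_and_value_or_spec : Claim_equal_counts_slot_and_value_or := by
  intro gt_allowed pred_vals _ hpre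
  obtain ⟨hg, hp⟩ := hpre
  have hg' : (gt_allowed.map svKey).Nodup := hg
  have hp' : (pred_vals.map svKey).Nodup := hp
  have htp := tp_as_keys gt_allowed pred_vals hg'
  have hfp := fp_compl_as_keys gt_allowed pred_vals hp'
  have hkeys := countP_svBoth_eq gt_allowed pred_vals hg' hp'
  have hfn := countP_add_countP_not gt_allowed (altCond pred_vals)
  have hfp2 := countP_add_countP_not pred_vals
      (fun e => (match svLookup? gt_allowed (e.1, e.2.1) with
                 | none => false
                 | some av => svInter e.2.2 av))
  rw [hfp, ← hkeys, ← htp] at hfp2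
  unfold Spec_counts_slot_and_value_or counts_slot_and_value_or counts_slot_and_value_or_alt
  simp only [foldGt_eq, foldPred_eq, Prod.mk.injEq]
  refine ⟨by omega, by omega, by omega⟩
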